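-- pv_equiv track=rewrite | github.com/buddygr/qpython-sl4a | gui/WinGui/Output.py | clbr
-- ===== SOURCE A (Python) =====
-- def clbr(x):
-- #去掉头尾空行
--     t=True
--     while t:
--         t=False
--         if x and x[0]=='\n':
--             x=x[1:]
--             t=True
--         if x and x[-1]=='\n':
--             x=x[:-1]
--             t=True
--     return x
-- ===== SOURCE B (Python) =====
-- def clbr(x):
--     # two index scans then a single slice, instead of A's repeated strip-and-reslice loop
--     lo = 0
--     n = len(x)
--     while lo < n and x[lo] == '\n':
--         lo += 1
--     hi = n
--     while hi > lo and x[hi - 1] == '\n':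
--         hi -= 1
--     return x[lo:hi]
-- ===== Notes on version B (the rewrite author's own statement) =====
-- stated objective: simpler
-- what changed: B computes the first and last non-newline positions with two independent index scans and returns one slice, instead of A's flag-driven loop that repeatedly re-slices the string one character at a time from each end.
import Mathlib
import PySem

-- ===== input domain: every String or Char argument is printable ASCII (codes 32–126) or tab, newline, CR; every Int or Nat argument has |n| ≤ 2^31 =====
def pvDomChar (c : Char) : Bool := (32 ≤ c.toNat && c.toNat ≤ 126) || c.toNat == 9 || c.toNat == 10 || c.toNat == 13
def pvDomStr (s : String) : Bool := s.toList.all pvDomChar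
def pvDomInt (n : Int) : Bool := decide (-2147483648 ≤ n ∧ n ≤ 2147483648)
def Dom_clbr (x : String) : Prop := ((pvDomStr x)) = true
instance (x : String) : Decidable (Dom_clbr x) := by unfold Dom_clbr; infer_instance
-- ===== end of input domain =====

-- B strips leading/trailing '\n' with two independent scans and one final slice,
-- instead of A's flag-driven loop that repeatedly re-slices one character per pass.

-- ===== PORT A =====
-- A's while-loop body: t=False; if x and x[0]=='\n': x=x[1:]; t=True;
-- if x and x[-1]=='\n': x=x[:-1]; t=True; loop again iff t.
-- Both branches taken → recurse on (x.drop 1).dropLast; only the first → x.drop 1;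
-- only the second → x.dropLast; neither → the flag is False and x is returned.
def clbrLoopA (x : List Char) : List Char :=
  if h1 : x ≠ [] ∧ x.head? = some '\n' then
    if h2 : x.drop 1 ≠ [] ∧ (x.drop 1).getLast? = some '\n' then
      clbrLoopA (x.drop 1).dropLast
    else
      clbrLoopA (x.drop 1)
  else
    if h2 : x ≠ [] ∧ x.getLast? = some '\n' then
      clbrLoopA x.dropLast
    else
      x
termination_by x.length
decreasing_by
  · have h0 : 0 < x.length := List.length_pos_iff.mpr h1.1
    simp only [List.length_dropLast, List.length_drop]
    omega
  · have h0 : 0 < x.length := List.length_pos_iff.mpr h1.1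
    simp only [List.length_drop]
    omega
  · have h0 : 0 < x.length := List.length_pos_iff.mpr h2.1
    simp only [List.length_dropLast]
    omega

def clbr (x : String) : String := String.mk (clbrLoopA x.toList)

-- ===== PORT B =====
-- 'while lo < n and x[lo] == "\n": lo += 1' then slice — advancing lo past a newline
-- is dropping it from the front of the remaining suffix.
def clbrFrontB : List Char → List Char
  | [] => []
  | c :: t => if c = '\n' then clbrFrontB t else c :: t

-- 'while hi > lo and x[hi-1] == "\n": hi -= 1' — dropping the last char while it is '\n'.
def clbrBackB (l : List Char) : List Char :=
  if l.getLast? = some '\n' then clbrBackB l.dropLast else l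
termination_by l.length
decreasing_by
  cases l with
  | nil => simp_all
  | cons a t => simp [List.length_dropLast]

def clbr_alt (x : String) : String := String.mk (clbrBackB (clbrFrontB x.toList))

-- ===== PRECONDITION & SPEC =====
def Spec_clbr (x : String) (out : String) : Prop := out = clbr_alt x
instance (x : String) (out : String) : Decidable (Spec_clbr x out) := by unfold Spec_clbr; infer_instance

-- ===== CLAIM (what is proved, stated in full; the proofs are below) =====
def Claim_equal_clbr : Prop := ∀ (x : String), Dom_clbr x → Spec_clbr x (clbr x)

-- ===== LEMMAS AND PROOFS =====

-- canonical form: strip newlines from the front, then from the back (via reverse)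
def clbrCanon (l : List Char) : List Char :=
  ((l.dropWhile (· = '\n')).reverse.dropWhile (· = '\n')).reverse

theorem clbr_concat_of_getLast? (l : List Char) (c : Char) (h : l.getLast? = some c) :
    l = l.dropLast ++ [c] := by
  induction l with
  | nil => simp at h
  | cons a t ih =>
      cases t with
      | nil => simp at h; simp [h]
      | cons b u =>
          have h' : (b :: u).getLast? = some c := by simpa using h
          have := ih h'
          simpa using congrArg (a :: ·) this

theorem clbrFrontB_eq_dropWhile (l : List Char) :
    clbrFrontB l = l.dropWhile (· = '\n') := by
  induction l with
  | nil => rfl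
  | cons c t ih =>
      by_cases h : c = '\n' <;> simp [clbrFrontB, h, ih]

theorem clbrBackB_eq (l : List Char) :
    clbrBackB l = (l.reverse.dropWhile (· = '\n')).reverse := by
  induction l using clbrBackB.induct with
  | case1 l hl ih =>
      have hl2 : l = l.dropLast ++ ['\n'] := clbr_concat_of_getLast? l _ hl
      rw [clbrBackB, if_pos hl, ih]
      conv_rhs => rw [hl2]
      simp [List.dropWhile_cons]
  | case2 l hl =>
      rw [clbrBackB, if_neg hl]
      cases hl' : l.getLast? with
      | none =>
          have : l = [] := by simpa using hl'
          simp [this]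
      | some c =>
          have hc : ¬ c = '\n' := by intro h; exact hl (h ▸ hl')
          have hl2 : l = l.dropLast ++ [c] := clbr_concat_of_getLast? l _ hl'
          conv_rhs => rw [hl2]
          simp [List.dropWhile_cons, hc]
          conv_lhs => rw [hl2]

theorem clbrCanon_cons_nl (t : List Char) : clbrCanon ('\n' :: t) = clbrCanon t := by
  simp [clbrCanon, List.dropWhile_cons]

theorem clbrCanon_concat_nl (l : List Char) :
    clbrCanon (l ++ ['\n']) = clbrCanon l := by
  unfold clbrCanon
  rw [List.dropWhile_append]
  by_cases hd : (l.dropWhile (· = '\n')).isEmpty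
  · simp [List.isEmpty_iff.mp hd, List.dropWhile_cons]
  · rw [if_neg hd]
    simp [List.dropWhile_cons]

theorem clbrCanon_fixed (l : List Char) (hh : l.head? ≠ some '\n')
    (hl : l.getLast? ≠ some '\n') : clbrCanon l = l := by
  unfold clbrCanon
  have h1 : l.dropWhile (· = '\n') = l := by
    cases l with
    | nil => rfl
    | cons c t =>
        have : ¬ c = '\n' := by intro h; exact hh (by simp [h])
        simp [List.dropWhile_cons, this]
  rw [h1]
  have h2 : l.reverse.dropWhile (· = '\n') = l.reverse := by
    cases hl' : l.getLast? with
    | none =>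
        have : l = [] := by simpa using hl'
        simp [this]
    | some c =>
        have hc : ¬ c = '\n' := by intro h; exact hl (h ▸ hl')
        have hl2 : l = l.dropLast ++ [c] := clbr_concat_of_getLast? l _ hl'
        conv_lhs => rw [hl2]
        simp [List.dropWhile_cons, hc]
        conv_rhs => rw [hl2]
        simp
  rw [h2, List.reverse_reverse]

theorem clbrLoopA_eq_canon (l : List Char) : clbrLoopA l = clbrCanon l := by
  induction l using clbrLoopA.induct with
  | case1 x h1 h2 ih =>
      obtain ⟨hne, hhd⟩ := h1
      obtain ⟨c, t, rfl⟩ : ∃ c t, x = c :: t := by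
        cases x with
        | nil => exact absurd rfl hne
        | cons c t => exact ⟨c, t, rfl⟩
      have hc : c = '\n' := by simpa using hhd
      simp only [List.drop_one, List.tail_cons] at ih h2
      rw [clbrLoopA, dif_pos ⟨hne, hhd⟩]
      rw [dif_pos (by simpa using h2)]
      simp only [List.drop_one, List.tail_cons]
      rw [ih]
      have ht : t = t.dropLast ++ ['\n'] := clbr_concat_of_getLast? t _ h2.2
      rw [hc, clbrCanon_cons_nl]
      conv_rhs => rw [ht]
      rw [clbrCanon_concat_nl]
  | case2 x h1 h2 ih =>
      obtain ⟨hne, hhd⟩ := h1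
      obtain ⟨c, t, rfl⟩ : ∃ c t, x = c :: t := by
        cases x with
        | nil => exact absurd rfl hne
        | cons c t => exact ⟨c, t, rfl⟩
      have hc : c = '\n' := by simpa using hhd
      simp only [List.drop_one, List.tail_cons] at ih h2
      rw [clbrLoopA, dif_pos ⟨hne, hhd⟩]
      rw [dif_neg (by simpa using h2)]
      simp only [List.drop_one, List.tail_cons]
      rw [ih, hc, clbrCanon_cons_nl]
  | case3 x h1 h2 ih =>
      rw [clbrLoopA, dif_neg h1, dif_pos h2, ih]
      have hx : x = x.dropLast ++ ['\n'] := clbr_concat_of_getLast? x _ h2.2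
      conv_rhs => rw [hx]
      rw [clbrCanon_concat_nl]
  | case4 x h1 h2 =>
      rw [clbrLoopA, dif_neg h1, dif_neg h2]
      by_cases hx : x = []
      · simp [hx, clbrCanon]
      · have hhd : x.head? ≠ some '\n' := by
          intro h; exact h1 ⟨hx, h⟩
        have hlast : x.getLast? ≠ some '\n' := by
          intro h; exact h2 ⟨hx, h⟩
        exact (clbrCanon_fixed x hhd hlast).symm

-- ===== VERDICT (by name: the statement is the Claim_ definition above) =====
theorem clbr_spec : Claim_equal_clbr := by
  intro x _
  unfold Spec_clbr clbr clbr_alt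
  rw [clbrFrontB_eq_dropWhile, clbrBackB_eq, clbrLoopA_eq_canon]
  rfl
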